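-- pv_equiv track=rewrite | github.com/bonshot/TDA_practicando | resueltos tomi/bolsas.py | bolsas_supermercado
-- ===== SOURCE A (Python) =====
-- def bolsas_supermercado(p, pesos):
--     pesos_disponibles_bolsas = [p]
--     bolsas_elementos = [[]]
--
--     pesos_restantes_a_embolsar = list(pesos)
--
--     while len(pesos_restantes_a_embolsar) > 0:
--         se_agrego_peso = False
--         for i in range(len(pesos_restantes_a_embolsar)):
--             peso = pesos_restantes_a_embolsar[i]
--             bolsa = len(pesos_disponibles_bolsas) - 1
--
--             if pesos_disponibles_bolsas[bolsa] >= peso: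
--                 pesos_disponibles_bolsas[bolsa] -= peso
--                 bolsas_elementos[bolsa].append(peso)
--                 se_agrego_peso = True
--                 pesos_restantes_a_embolsar.pop(i)
--                 break
--         if not se_agrego_peso:
--             pesos_disponibles_bolsas.append(p)
--             bolsas_elementos.append([])
--
--     return bolsas_elementos
-- ===== SOURCE B (Python) =====
-- def _min2(a, b):
--     if a is None:
--         return b
--     if b is None:
--         return a
--     return a if a <= b else b
--
--
-- def _build(pesos, lo, hi):
--     # segment-tree node over pesos[lo:hi]: (subtree minimum, left child, right child)
--     if hi - lo == 1:
--         return (pesos[lo], None, None)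
--     mid = (lo + hi) // 2
--     izq = _build(pesos, lo, mid)
--     der = _build(pesos, mid, hi)
--     return (_min2(izq[0], der[0]), izq, der)
--
--
-- def _extract(cap, nodo):
--     # remove and return the leftmost value <= cap in the subtree (None if there is none)
--     m, izq, der = nodo
--     if m is None or m > cap:
--         return None, nodo
--     if izq is None:
--         return m, (None, None, None)
--     x, izq2 = _extract(cap, izq)
--     if x is not None:
--         return x, (_min2(izq2[0], der[0]), izq2, der)
--     x, der2 = _extract(cap, der)
--     return x, (_min2(izq[0], der2[0]), izq, der2)
--
--
-- def bolsas_supermercado(p, pesos):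
--     bolsas = [[]]
--     if not pesos:
--         return bolsas
--     raiz = _build(pesos, 0, len(pesos))
--     capacidad = p
--     quedan = len(pesos)
--     while quedan > 0:
--         x, raiz2 = _extract(capacidad, raiz)
--         if x is None:
--             bolsas.append([])
--             capacidad = p
--         else:
--             bolsas[-1].append(x)
--             capacidad -= x
--             raiz = raiz2
--             quedan -= 1
--     return bolsas
-- ===== Notes on version B (the rewrite author's own statement) =====
-- stated objective: alternative
-- what changed: Instead of rescanning the whole remaining list after every single placement, B builds a segment tree of subtree minima over the weights and repeatedly extracts (and deletes) the leftmost remaining weight that fits the current bag's capacity; the ports agree on every input (on inputs containing a weight that never fits, both Pythons diverge alike); intended as the asymptotically better design, but a timing run did not confirm a 1.5x speedup, so no speed is claimed.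
import Mathlib
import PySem

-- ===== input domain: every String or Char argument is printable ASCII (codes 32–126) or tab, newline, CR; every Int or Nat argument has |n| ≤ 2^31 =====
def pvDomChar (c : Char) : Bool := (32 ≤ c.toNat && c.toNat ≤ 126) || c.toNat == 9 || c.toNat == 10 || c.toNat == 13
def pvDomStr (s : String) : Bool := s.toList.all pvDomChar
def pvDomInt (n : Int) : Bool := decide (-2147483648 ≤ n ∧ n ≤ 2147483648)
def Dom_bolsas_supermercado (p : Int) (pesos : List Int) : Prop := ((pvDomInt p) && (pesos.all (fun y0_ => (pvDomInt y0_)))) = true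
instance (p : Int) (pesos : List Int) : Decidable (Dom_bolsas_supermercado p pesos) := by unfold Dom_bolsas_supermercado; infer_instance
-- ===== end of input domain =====

-- B replaces A's rescan-the-whole-remaining-list-per-placement by a segment tree of subtree
-- minima (extract the leftmost remaining weight that fits, delete it); same result on every
-- input by a genuinely different data structure and traversal.


-- ===== PORT A =====
-- the inner `for i in range(...)` with its `pop(i)` and `break`: first value with cap ≥ x,
-- together with the list it was popped from; none = the scan found nothing
def extractFirstFit (cap : Int) : List Int → Option (Int × List Int)
  | [] => none
  | x :: t =>
    if cap ≥ x then some (x, t)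
    else (extractFirstFit cap t).map (fun r => (r.1, x :: r.2))

-- Python mutates only the LAST entry of each list; `updLast f` is that in-place update
def updLast {α : Type} (f : α → α) : List α → List α
  | [] => []
  | [a] => [f a]
  | a :: b :: t => a :: updLast f (b :: t)

-- the `while` loop of A; fuel because the Python loop diverges when some weight exceeds p
def loopA (p : Int) : Nat → List Int → List (List Int) → List Int → List (List Int)
  | 0, _, bags, _ => bags
  | fuel + 1, caps, bags, rest =>
    if rest.isEmpty then bags
    else
      match extractFirstFit (caps.getLastD 0) rest with
      | some (x, rest') => loopA p fuel (updLast (· - x) caps) (updLast (· ++ [x]) bags) rest'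
      | none => loopA p fuel (caps ++ [p]) (bags ++ [[]]) rest

def bolsas_supermercado (p : Int) (pesos : List Int) : List (List Int) :=
  loopA p (2 * pesos.length + 1) [p] [[]] pesos

-- ===== PORT B =====
-- Source B's node tuples (m, izq, der): a leaf has izq = der = None
inductive Seg where
  | leaf : Option Int → Seg
  | node : Option Int → Seg → Seg → Seg
deriving Repr, DecidableEq

-- the m field of a node tuple
def sval : Seg → Option Int
  | .leaf m => m
  | .node m _ _ => m

-- _min2: minimum of two optional values, None = nothing there
def min2 : Option Int → Option Int → Option Int
  | none, b => b
  | some a, none => some a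
  | some a, some b => if a ≤ b then some a else some b

-- _build over pesos[lo:hi] (always called with lo < hi ≤ pesos.length, where pesos.getD lo 0
-- is exactly Python's pesos[lo]; Python's `hi - lo == 1` is `hi ≤ lo + 1` on those calls)
def build (pesos : List Int) (lo hi : Nat) : Seg :=
  if h : hi ≤ lo + 1 then .leaf (some (pesos.getD lo 0))
  else
    let mid := (lo + hi) / 2
    let izq := build pesos lo mid
    let der := build pesos mid hi
    .node (min2 (sval izq) (sval der)) izq der
termination_by hi - lo
decreasing_by all_goals simp at h; omega

-- _extract: Python's guard `m is None or m > cap` is the two first branches; `izq is None` is the leaf case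
def extract (cap : Int) : Seg → Option Int × Seg
  | .leaf none => (none, .leaf none)
  | .leaf (some v) =>
    if v > cap then (none, .leaf (some v)) else (some v, .leaf none)
  | .node none izq der => (none, .node none izq der)
  | .node (some mv) izq der =>
    if mv > cap then (none, .node (some mv) izq der)
    else
      match extract cap izq with
      | (some x, izq2) => (some x, .node (min2 (sval izq2) (sval der)) izq2 der)
      | (none, _) =>
        match extract cap der with
        | (o, der2) => (o, .node (min2 (sval izq) (sval der2)) izq der2)

-- the `while quedan > 0` loop of Source B; fuel because it, too, diverges when some weight exceeds p
def loopC (p : Int) : Nat → Seg → Int → Nat → List (List Int) → List (List Int)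
  | 0, _, _, _, bolsas => bolsas
  | fuel + 1, raiz, cap, quedan, bolsas =>
    if 0 < quedan then
      match extract cap raiz with
      | (none, _) => loopC p fuel raiz p quedan (bolsas ++ [[]])
      | (some x, raiz2) => loopC p fuel raiz2 (cap - x) (quedan - 1) (updLast (· ++ [x]) bolsas)
    else bolsas

def bolsas_supermercado_alt (p : Int) (pesos : List Int) : List (List Int) :=
  if pesos.isEmpty then [[]]
  else loopC p (2 * pesos.length + 1) (build pesos 0 pesos.length) p pesos.length [[]]

-- ===== PRECONDITION & SPEC =====  (no Pre_: the two ports agree on every input)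
def Spec_bolsas_supermercado (p : Int) (pesos : List Int) (out : List (List Int)) : Prop := out = bolsas_supermercado_alt p pesos
instance (p : Int) (pesos : List Int) (out : List (List Int)) : Decidable (Spec_bolsas_supermercado p pesos out) := by unfold Spec_bolsas_supermercado; infer_instance

-- ===== CLAIM (what is proved, stated in full; the proofs are below) =====
def Claim_equal_bolsas_supermercado : Prop := ∀ (p : Int) (pesos : List Int), Dom_bolsas_supermercado p pesos → Spec_bolsas_supermercado p pesos (bolsas_supermercado p pesos)

-- ===== LEMMAS AND PROOFS =====

theorem updLast_append {α : Type} (f : α → α) (l : List α) (a : α) :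
    updLast f (l ++ [a]) = l ++ [f a] := by
  induction l with
  | nil => rfl
  | cons b t ih =>
    cases t with
    | nil => simp [updLast]
    | cons c u => simpa [updLast] using ih

-- the surviving values of a subtree, in index order
def toL : Seg → List Int
  | .leaf none => []
  | .leaf (some v) => [v]
  | .node _ l r => toL l ++ toL r

-- well-formedness: every node's m field is the minimum of its subtree's surviving values
def WF : Seg → Prop
  | .leaf _ => True
  | .node m l r => WF l ∧ WF r ∧ m = min2 (sval l) (sval r)

theorem sval_spec : ∀ t : Seg, WF t →
    (sval t = none ∧ toL t = []) ∨
      ∃ m, sval t = some m ∧ m ∈ toL t ∧ ∀ y ∈ toL t, m ≤ y := by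
  intro t
  induction t with
  | leaf m =>
    intro _
    cases m with
    | none => exact Or.inl ⟨rfl, rfl⟩
    | some v => exact Or.inr ⟨v, rfl, by simp [toL], by simp [toL]⟩
  | node m l r ihl ihr =>
    intro hwf
    obtain ⟨hl, hr, hm⟩ := hwf
    have hs : sval (Seg.node m l r) = min2 (sval l) (sval r) := hm
    have ht : toL (Seg.node m l r) = toL l ++ toL r := rfl
    rcases ihl hl with ⟨hln, hle⟩ | ⟨ml, hml, hmem, hmin⟩ <;>
      rcases ihr hr with ⟨hrn, hre⟩ | ⟨mr, hmr, hmem', hmin'⟩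
    · exact Or.inl ⟨by rw [hs, hln, hrn]; rfl, by rw [ht, hle, hre]; rfl⟩
    · refine Or.inr ⟨mr, by rw [hs, hln, hmr]; rfl, ?_, ?_⟩
      · rw [ht, hle]; simpa using hmem'
      · intro y hy; rw [ht, hle] at hy; exact hmin' y (by simpa using hy)
    · refine Or.inr ⟨ml, by rw [hs, hml, hrn]; rfl, ?_, ?_⟩
      · rw [ht, hre]; simpa using hmem
      · intro y hy; rw [ht, hre] at hy; exact hmin y (by simpa using hy)
    · by_cases hc : ml ≤ mr
      · refine Or.inr ⟨ml, by rw [hs, hml, hmr]; simp [min2, hc], ?_, ?_⟩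
        · rw [ht]; simp [hmem]
        · intro y hy
          rw [ht] at hy; simp at hy
          rcases hy with hy | hy
          · exact hmin y hy
          · exact le_trans hc (hmin' y hy)
      · refine Or.inr ⟨mr, by rw [hs, hml, hmr]; simp [min2, hc], ?_, ?_⟩
        · rw [ht]; simp [hmem']
        · intro y hy
          rw [ht] at hy; simp at hy
          rcases hy with hy | hy
          · exact le_trans (by omega) (hmin y hy)
          · exact hmin' y hy

theorem extract_allgt (cap : Int) (s : List Int) (h : ∀ y ∈ s, ¬ y ≤ cap) :
    extractFirstFit cap s = none := by
  induction s with
  | nil => rfl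
  | cons z t ih =>
    have hz : ¬ cap ≥ z := by have := h z (by simp); omega
    have := ih (fun y hy => h y (by simp [hy]))
    simp [extractFirstFit, hz, this]

theorem extract_append_some (cap x : Int) (s s' t : List Int)
    (h : extractFirstFit cap s = some (x, s')) :
    extractFirstFit cap (s ++ t) = some (x, s' ++ t) := by
  induction s generalizing s' with
  | nil => simp [extractFirstFit] at h
  | cons z u ih =>
    by_cases hz : cap ≥ z
    · have heq : extractFirstFit cap (z :: u) = some (z, u) := by
        simp [extractFirstFit, hz]
      rw [heq] at h
      simp only [Option.some.injEq, Prod.mk.injEq] at h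
      obtain ⟨hx, ht⟩ := h
      subst hx; subst ht
      simp [extractFirstFit, hz]
    · cases hext2 : extractFirstFit cap u with
      | none => simp [extractFirstFit, hz, hext2] at h
      | some r =>
        obtain ⟨x', u'⟩ := r
        have heq : extractFirstFit cap (z :: u) = some (x', z :: u') := by
          simp [extractFirstFit, hz, hext2]
        rw [heq] at h
        simp only [Option.some.injEq, Prod.mk.injEq] at h
        obtain ⟨hx, hr⟩ := h
        subst hx; subst hr
        have := ih u' hext2
        simp [extractFirstFit, hz, this]

theorem extract_append_none (cap : Int) (s t : List Int)
    (h : extractFirstFit cap s = none) :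
    extractFirstFit cap (s ++ t) =
      (extractFirstFit cap t).map (fun r => (r.1, s ++ r.2)) := by
  induction s with
  | nil => simp
  | cons z u ih =>
    by_cases hz : cap ≥ z
    · simp [extractFirstFit, hz] at h
    · have h' : extractFirstFit cap u = none := by
        simp [extractFirstFit, hz] at h
        exact h
      have := ih h'
      simp [extractFirstFit, hz, this]
      cases extractFirstFit cap t <;> simp

theorem extract_basic (cap x : Int) (rest rest' : List Int)
    (h : extractFirstFit cap rest = some (x, rest')) :
    x ≤ cap ∧ rest.length = rest'.length + 1 := by
  induction rest generalizing rest' with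
  | nil => simp [extractFirstFit] at h
  | cons z t ih =>
    by_cases hz : cap ≥ z
    · have heq : extractFirstFit cap (z :: t) = some (z, t) := by
        simp [extractFirstFit, hz]
      rw [heq] at h
      simp only [Option.some.injEq, Prod.mk.injEq] at h
      obtain ⟨hx, ht⟩ := h
      subst hx; subst ht
      exact ⟨hz, by simp⟩
    · cases hext2 : extractFirstFit cap t with
      | none => simp [extractFirstFit, hz, hext2] at h
      | some r =>
        obtain ⟨x', t'⟩ := r
        have heq : extractFirstFit cap (z :: t) = some (x', z :: t') := by
          simp [extractFirstFit, hz, hext2]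
        rw [heq] at h
        simp only [Option.some.injEq, Prod.mk.injEq] at h
        obtain ⟨hx, hr⟩ := h
        subst hx; subst hr
        obtain ⟨hxc, hlen⟩ := ih t' hext2
        exact ⟨hxc, by simp [hlen]⟩

-- extract computes exactly A's first-fit extraction on the surviving values
theorem extract_spec (cap : Int) : ∀ t : Seg, WF t →
    (∀ t', extract cap t = (none, t') → t' = t ∧ extractFirstFit cap (toL t) = none) ∧
    (∀ x t', extract cap t = (some x, t') →
      extractFirstFit cap (toL t) = some (x, toL t') ∧ WF t') := by
  intro t
  induction t with
  | leaf m =>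
    intro _
    cases m with
    | none =>
      refine ⟨fun t' h => ?_, fun x t' h => ?_⟩
      · simp [extract] at h
        exact ⟨h.symm, rfl⟩
      · simp [extract] at h
    | some v =>
      by_cases hv : v > cap
      · refine ⟨fun t' h => ?_, fun x t' h => ?_⟩
        · simp [extract, hv] at h
          refine ⟨h.symm, ?_⟩
          simp [toL, extractFirstFit]
          omega
        · simp [extract, hv] at h
      · refine ⟨fun t' h => ?_, fun x t' h => ?_⟩
        · simp [extract, hv] at h
        · simp [extract, hv] at h
          obtain ⟨hx, ht⟩ := h
          subst hx; subst ht
          exact ⟨by simp [toL, extractFirstFit]; omega, trivial⟩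
  | node m l r ihl ihr =>
    intro hwf
    obtain ⟨hl, hr, hm⟩ := hwf
    have htn : toL (Seg.node m l r) = toL l ++ toL r := rfl
    cases m with
    | none =>
      -- whole subtree already emptied
      have hempty : toL (Seg.node none l r) = [] := by
        rcases sval_spec (Seg.node none l r) ⟨hl, hr, hm⟩ with ⟨_, he⟩ | ⟨mm, hmm, _, _⟩
        · exact he
        · exact absurd hmm (by simp [sval])
      refine ⟨fun t' h => ?_, fun x t' h => ?_⟩
      · simp [extract] at h
        exact ⟨h.symm, by rw [hempty]; rfl⟩
      · simp [extract] at h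
    | some mv =>
      by_cases hmv : mv > cap
      · -- subtree minimum too big: nothing in the subtree fits
        have hallgt : ∀ y ∈ toL (Seg.node (some mv) l r), ¬ y ≤ cap := by
          rcases sval_spec (Seg.node (some mv) l r) ⟨hl, hr, hm⟩ with ⟨hmm, _⟩ | ⟨mm, hmm, _, hmin⟩
          · exact absurd hmm (by simp [sval])
          · have hvm : mv = mm := by simpa [sval] using hmm
            subst hvm
            intro y hy
            have := hmin y hy
            omega
        refine ⟨fun t' h => ?_, fun x t' h => ?_⟩
        · simp [extract, hmv] at h
          exact ⟨h.symm, extract_allgt cap _ hallgt⟩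
        · simp [extract, hmv] at h
      · cases hexl : extract cap l with
        | mk ol l2 =>
          cases ol with
          | some x =>
            -- taken from the left subtree
            obtain ⟨hefl, hwfl2⟩ := (ihl hl).2 x l2 hexl
            have hres : extract cap (Seg.node (some mv) l r)
                = (some x, Seg.node (min2 (sval l2) (sval r)) l2 r) := by
              simp [extract, hmv, hexl]
            refine ⟨fun t' h => ?_, fun x2 t' h => ?_⟩
            · rw [hres] at h; simp at h
            · rw [hres] at h
              have hx : some x = some x2 := congrArg Prod.fst h
              have ht : Seg.node (min2 (sval l2) (sval r)) l2 r = t' := congrArg Prod.snd h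
              injection hx with hx2
              subst hx2; subst ht
              refine ⟨?_, hwfl2, hr, rfl⟩
              rw [htn]
              have := extract_append_some cap x (toL l) (toL l2) (toL r) hefl
              rw [this]
              rfl
          | none =>
            -- left subtree has nothing that fits; continue in the right one
            obtain ⟨hl2, hefl⟩ := (ihl hl).1 l2 hexl
            cases hexr : extract cap r with
            | mk orr r2 =>
              have hres : extract cap (Seg.node (some mv) l r)
                  = (orr, Seg.node (min2 (sval l) (sval r2)) l r2) := by
                simp [extract, hmv, hexl, hexr]
              cases orr with
              | none =>
                obtain ⟨hr2, hefr⟩ := (ihr hr).1 r2 hexr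
                refine ⟨fun t' h => ?_, fun x t' h => ?_⟩
                · rw [hres] at h
                  simp only [Prod.mk.injEq] at h
                  refine ⟨?_, ?_⟩
                  · rw [← h.2, hr2, ← hm]
                  · rw [htn, extract_append_none cap (toL l) (toL r) hefl, hefr]
                    rfl
                · rw [hres] at h; simp at h
              | some x =>
                obtain ⟨hefr, hwfr2⟩ := (ihr hr).2 x r2 hexr
                refine ⟨fun t' h => ?_, fun x2 t' h => ?_⟩
                · rw [hres] at h; simp at h
                · rw [hres] at h
                  have hx : some x = some x2 := congrArg Prod.fst h
                  have ht : Seg.node (min2 (sval l) (sval r2)) l r2 = t' := congrArg Prod.snd h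
                  injection hx with hx2
                  subst hx2; subst ht
                  refine ⟨?_, hl, hwfr2, rfl⟩
                  rw [htn, extract_append_none cap (toL l) (toL r) hefl, hefr]
                  rfl

-- step equations for the two loops
theorem loopA_stop (p : Int) (f : Nat) (caps : List Int) (bags : List (List Int)) :
    loopA p (f + 1) caps bags [] = bags := rfl

theorem loopA_some (p : Int) (f : Nat) (caps : List Int) (bags : List (List Int))
    (rest rest' : List Int) (x : Int) (hne : ¬ rest.isEmpty)
    (h : extractFirstFit (caps.getLastD 0) rest = some (x, rest')) :
    loopA p (f + 1) caps bags rest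
      = loopA p f (updLast (· - x) caps) (updLast (· ++ [x]) bags) rest' := by
  rw [loopA, if_neg (by simpa using hne), h]

theorem loopA_none (p : Int) (f : Nat) (caps : List Int) (bags : List (List Int))
    (rest : List Int) (hne : ¬ rest.isEmpty)
    (h : extractFirstFit (caps.getLastD 0) rest = none) :
    loopA p (f + 1) caps bags rest = loopA p f (caps ++ [p]) (bags ++ [[]]) rest := by
  rw [loopA, if_neg (by simpa using hne), h]

theorem loopC_stop (p : Int) (f : Nat) (raiz : Seg) (cap : Int)
    (bolsas : List (List Int)) : loopC p (f + 1) raiz cap 0 bolsas = bolsas := rfl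

theorem loopC_some (p : Int) (f : Nat) (raiz raiz2 : Seg) (cap x : Int) (quedan : Nat)
    (bolsas : List (List Int)) (hq : 0 < quedan) (h : extract cap raiz = (some x, raiz2)) :
    loopC p (f + 1) raiz cap quedan bolsas
      = loopC p f raiz2 (cap - x) (quedan - 1) (updLast (· ++ [x]) bolsas) := by
  rw [loopC, if_pos hq, h]

theorem loopC_none (p : Int) (f : Nat) (raiz raiz2 : Seg) (cap : Int) (quedan : Nat)
    (bolsas : List (List Int)) (hq : 0 < quedan) (h : extract cap raiz = (none, raiz2)) :
    loopC p (f + 1) raiz cap quedan bolsas = loopC p f raiz p quedan (bolsas ++ [[]]) := by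
  rw [loopC, if_pos hq, h]

-- A and B run in lockstep: same fuel, same bag accumulator, rest = surviving tree values
theorem lockstep (p : Int) : ∀ (f : Nat) (t : Seg) (cap : Int) (quedan : Nat)
    (caps₀ : List Int) (bols : List (List Int)), WF t → quedan = (toL t).length →
    loopA p f (caps₀ ++ [cap]) bols (toL t) = loopC p f t cap quedan bols := by
  intro f
  induction f with
  | zero => intro t cap quedan caps₀ bols _ _; rfl
  | succ f ih =>
    intro t cap quedan caps₀ bols hwf hq
    by_cases hq0 : 0 < quedan
    · have hne : ¬ (toL t).isEmpty := by
        rw [List.isEmpty_iff]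
        intro h
        rw [h] at hq; simp at hq; omega
      obtain ⟨hnone, hsome⟩ := extract_spec cap t hwf
      cases hex : extract cap t with
      | mk o t2 =>
        cases o with
        | none =>
          obtain ⟨ht2, hef⟩ := hnone t2 hex
          rw [loopA_none p f _ bols (toL t) hne (by rwa [List.getLastD_concat]),
            loopC_none p f t t2 cap quedan bols hq0 hex]
          exact ih t p quedan (caps₀ ++ [cap]) (bols ++ [[]]) hwf hq
        | some x =>
          obtain ⟨hef, hwf2⟩ := hsome x t2 hex
          rw [loopA_some p f _ bols (toL t) (toL t2) x hne (by rwa [List.getLastD_concat]),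
            loopC_some p f t t2 cap x quedan bols hq0 hex, updLast_append]
          obtain ⟨_, hlen⟩ := extract_basic cap x (toL t) (toL t2) hef
          exact ih t2 (cap - x) (quedan - 1) caps₀ (updLast (· ++ [x]) bols) hwf2 (by omega)
    · have hq' : quedan = 0 := by omega
      subst hq'
      have ht0 : toL t = [] := by
        cases h : toL t with
        | nil => rfl
        | cons a u => rw [h] at hq; simp at hq
      rw [ht0, loopA_stop, loopC_stop]

theorem build_spec (pesos : List Int) : ∀ (n lo hi : Nat), hi - lo ≤ n → lo < hi →
    hi ≤ pesos.length →
    WF (build pesos lo hi) ∧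
      toL (build pesos lo hi) = (pesos.drop lo).take (hi - lo) := by
  intro n
  induction n with
  | zero => intro lo hi h1 h2 _; omega
  | succ n ih =>
    intro lo hi h1 h2 h3
    rw [build]
    by_cases hle : hi ≤ lo + 1
    · rw [dif_pos hle]
      have hhi : hi = lo + 1 := by omega
      have hlt : lo < pesos.length := by omega
      have hdrop : pesos.drop lo = pesos[lo] :: pesos.drop (lo + 1) :=
        List.drop_eq_getElem_cons hlt
      have hg : pesos.getD lo 0 = pesos[lo] := List.getD_eq_getElem pesos 0 hlt
      refine ⟨trivial, ?_⟩
      have h1 : hi - lo = 1 := by omega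
      rw [h1, hg]
      simp only [toL]
      rw [hdrop]
      rfl
    · rw [dif_neg hle]
      have hmid1 : lo < (lo + hi) / 2 := by omega
      have hmid2 : (lo + hi) / 2 < hi := by omega
      obtain ⟨hwl, htl⟩ := ih lo ((lo + hi) / 2) (by omega) hmid1 (by omega)
      obtain ⟨hwr, htr⟩ := ih ((lo + hi) / 2) hi (by omega) hmid2 h3
      refine ⟨⟨hwl, hwr, rfl⟩, ?_⟩
      have : toL (Seg.node (min2 (sval (build pesos lo ((lo + hi) / 2)))
            (sval (build pesos ((lo + hi) / 2) hi))) (build pesos lo ((lo + hi) / 2))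
            (build pesos ((lo + hi) / 2) hi))
          = toL (build pesos lo ((lo + hi) / 2)) ++ toL (build pesos ((lo + hi) / 2) hi) := rfl
      rw [this, htl, htr]
      have hdd : pesos.drop ((lo + hi) / 2) = (pesos.drop lo).drop ((lo + hi) / 2 - lo) := by
        rw [List.drop_drop]
        congr 1
        omega
      rw [hdd, ← List.take_add]
      congr 1
      omega

-- ===== VERDICT (by name: the statement is the Claim_ definition above) =====
theorem bolsas_supermercado_spec : Claim_equal_bolsas_supermercado := by
  intro p pesos _
  unfold Spec_bolsas_supermercado bolsas_supermercado bolsas_supermercado_alt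
  cases pesos with
  | nil => rfl
  | cons a t =>
    rw [if_neg (by simp)]
    obtain ⟨hwf, htl⟩ := build_spec (a :: t) (a :: t).length 0 (a :: t).length
      (by omega) (by simp) le_rfl
    have htl' : toL (build (a :: t) 0 (a :: t).length) = a :: t := by
      simpa using htl
    have := lockstep p (2 * (a :: t).length + 1) (build (a :: t) 0 (a :: t).length)
      p (a :: t).length [] [[]] hwf (by rw [htl'])
    rw [htl'] at this
    simpa using this
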